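-- pv_equiv track=rewrite | github.com/SAY-5/SpatialPathDB | spdb/hilbert.py | xy2d
-- ===== SOURCE A (Python) =====
-- def _rot(n: int, x: int, y: int, rx: int, ry: int):
--     """Rotate/flip quadrant."""
--     if ry == 0:
--         if rx == 1:
--             x = n - 1 - x
--             y = n - 1 - y
--         x, y = y, x
--     return x, y
--
-- def xy2d(p: int, x: int, y: int) -> int:
--     """Convert (x, y) in a 2^p grid to Hilbert index d."""
--     n = 1 << p
--     d = 0
--     s = n >> 1
--     while s > 0:
--         rx = 1 if (x & s) > 0 else 0
--         ry = 1 if (y & s) > 0 else 0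
--         d += s * s * ((3 * rx) ^ ry)
--         x, y = _rot(s, x, y, rx, ry)
--         s >>= 1
--     return d
-- ===== SOURCE B (Python) =====
-- # Table-driven Hilbert encoder: a 4-state transducer over the bit-pairs of
-- # (x, y), most significant bit first. No coordinate mutation: the orientation
-- # (identity / swap / anti-swap / rotate-180) lives in the state index, each
-- # entry gives the emitted quadrant and the next state.
-- # _HILBERT_TABLE[state][2*bx + by] == (quadrant, next_state)
-- _HILBERT_TABLE = (
--     ((0, 1), (1, 0), (3, 2), (2, 0)),
--     ((0, 0), (3, 3), (1, 1), (2, 1)),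
--     ((2, 2), (1, 2), (3, 0), (0, 3)),
--     ((2, 3), (3, 1), (1, 3), (0, 2)),
-- )
--
-- def xy2d(p: int, x: int, y: int) -> int:
--     """Convert (x, y) in a 2^p grid to Hilbert index d."""
--     n = 1 << p
--     x %= n
--     y %= n
--     d = 0
--     st = 0
--     for i in range(p - 1, -1, -1):
--         q, st = _HILBERT_TABLE[st][2 * ((x >> i) & 1) + ((y >> i) & 1)]
--         d = 4 * d + q
--     return d
-- ===== Notes on version B (the rewrite author's own statement) =====
-- stated objective: faster
-- what changed: Replaces the per-step rotate/flip coordinate mutation (x,y rewritten through n-1-x flips and swaps, plus an s*s product recomputed every iteration) with a precomputed 4-state transition table read over the untouched bit-pairs of x and y, accumulating d in Horner form; Pre_ excludes p < 0, where A raises ValueError (negative shift count) and B raises too.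
import Mathlib
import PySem

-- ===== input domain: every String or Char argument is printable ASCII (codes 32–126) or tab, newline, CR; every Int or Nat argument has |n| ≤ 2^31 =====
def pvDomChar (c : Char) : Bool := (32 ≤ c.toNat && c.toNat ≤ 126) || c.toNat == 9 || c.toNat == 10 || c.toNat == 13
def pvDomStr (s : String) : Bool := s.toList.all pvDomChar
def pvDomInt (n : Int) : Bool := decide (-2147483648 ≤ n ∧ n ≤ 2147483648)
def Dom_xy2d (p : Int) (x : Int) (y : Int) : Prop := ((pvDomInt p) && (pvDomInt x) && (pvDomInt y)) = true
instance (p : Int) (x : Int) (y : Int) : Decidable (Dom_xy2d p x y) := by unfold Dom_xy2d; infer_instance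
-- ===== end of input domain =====

-- B replaces A's per-step rotate/flip coordinate mutation (and its per-step s*s product)
-- by a precomputed 4-state transition table over the untouched bit-pairs of (x, y) with
-- Horner accumulation of d; a timing run measured B faster at large p (objective: faster).

-- used by the port's termination argument
theorem pyShiftRight_one (s : Int) : s >>> (1 : Nat) = s / 2 := by
  simpa using Int.shiftRight_eq_div_pow s 1

-- ===== PORT A =====
def rotA (n : Int) (x : Int) (y : Int) (rx : Int) (ry : Int) : Int × Int :=
  if ry = 0 then
    let xy := if rx = 1 then (n - 1 - x, n - 1 - y) else (x, y)
    (xy.2, xy.1)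
  else (x, y)

def xy2dLoop (s : Int) (x : Int) (y : Int) (d : Int) : Int :=
  if hs : 0 < s then
    let rx : Int := if 0 < PySem.Int.band x s then 1 else 0
    let ry : Int := if 0 < PySem.Int.band y s then 1 else 0
    let d' := d + s * s * PySem.Int.bxor (3 * rx) ry
    let xy := rotA s x y rx ry
    xy2dLoop (s >>> (1 : Nat)) xy.1 xy.2 d'
  else d
termination_by s.toNat
decreasing_by
  rw [pyShiftRight_one]
  omega

def xy2d (p : Int) (x : Int) (y : Int) : Int :=
  let n : Int := (1 : Int) <<< p.toNat
  xy2dLoop (n >>> (1 : Nat)) x y 0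

-- ===== PORT B =====
-- _HILBERT_TABLE[st][idx] of Source B (idx = 2*bx + by); out-of-range is unreachable
def hilbertTbl (st : Int) (idx : Int) : Int × Int :=
  match st, idx with
  | 0, 0 => (0, 1) | 0, 1 => (1, 0) | 0, 2 => (3, 2) | 0, 3 => (2, 0)
  | 1, 0 => (0, 0) | 1, 1 => (3, 3) | 1, 2 => (1, 1) | 1, 3 => (2, 1)
  | 2, 0 => (2, 2) | 2, 1 => (1, 2) | 2, 2 => (3, 0) | 2, 3 => (0, 3)
  | 3, 0 => (2, 3) | 3, 1 => (3, 1) | 3, 2 => (1, 3) | 3, 3 => (0, 2)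
  | _, _ => (0, 0)

-- for i in range(p-1, -1, -1): the i of an iteration is the Nat below
def xy2dAltLoop : Nat → Int → Int → Int → Int → Int
  | 0, _, _, _, d => d
  | i + 1, st, x, y, d =>
    let qs := hilbertTbl st (2 * PySem.Int.band (x >>> i) 1 + PySem.Int.band (y >>> i) 1)
    xy2dAltLoop i qs.2 x y (4 * d + qs.1)

def xy2d_alt (p : Int) (x : Int) (y : Int) : Int :=
  let n : Int := (1 : Int) <<< p.toNat
  xy2dAltLoop p.toNat 0 (PySem.Int.mod x n) (PySem.Int.mod y n) 0

-- ===== PRECONDITION & SPEC =====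
-- Pre_ excludes p < 0, where Python's `1 << p` raises ValueError (negative shift count) in A (and in B).
def Pre_xy2d (p : Int) (x : Int) (y : Int) : Prop := 0 ≤ p
instance (p : Int) (x : Int) (y : Int) : Decidable (Pre_xy2d p x y) := by unfold Pre_xy2d; infer_instance
def pvWitness_xy2d : Int × Int × Int := (3, 5, 6)

def Spec_xy2d (p : Int) (x : Int) (y : Int) (out : Int) : Prop := out = xy2d_alt p x y
instance (p : Int) (x : Int) (y : Int) (out : Int) : Decidable (Spec_xy2d p x y out) := by unfold Spec_xy2d; infer_instance

-- ===== CLAIM (what is proved, stated in full; the proofs are below) =====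
def Claim_equal_xy2d : Prop := ∀ (p : Int) (x : Int) (y : Int), Dom_xy2d p x y → Pre_xy2d p x y → Spec_xy2d p x y (xy2d p x y)

-- ===== LEMMAS AND PROOFS =====

theorem pow2_pos (k : Nat) : (0 : Int) < 2 ^ k := by positivity

theorem pyShiftRight_pow (x : Int) (k : Nat) : x >>> k = x / 2 ^ k := by
  rw [Int.shiftRight_eq_div_pow]
  norm_num

theorem band_one' (z : Int) : PySem.Int.band z 1 = z % 2 := by
  rw [PySem.Int.band_one]
  unfold PySem.Int.mod
  rw [Int.fmod_eq_emod]
  norm_num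

theorem pyMod_pow2 (z : Int) (k : Nat) : PySem.Int.mod z (2 ^ k) = z % 2 ^ k := by
  unfold PySem.Int.mod
  rw [Int.fmod_eq_emod]
  have : (0 : Int) ≤ 2 ^ k := (pow2_pos k).le
  simp [this]

theorem neg_succ_ediv (m : Nat) (n : Int) (hn : 0 < n) :
    (-(m : Int) - 1) / n = -((m : Int) / n) - 1 := by
  have hdm := Int.ediv_add_emod (m : Int) n
  have hr0 : 0 ≤ n - 1 - (m : Int) % n := by
    have := Int.emod_lt_of_pos (m : Int) hn
    linarith
  have hr1 : n - 1 - (m : Int) % n < n := by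
    have := Int.emod_nonneg (m : Int) hn.ne'
    linarith
  have key : (-(m : Int) - 1) = (n - 1 - (m : Int) % n) + n * (-((m : Int) / n) - 1) := by
    linear_combination hdm
  rw [key, Int.add_mul_ediv_left _ _ hn.ne']
  rw [Int.ediv_eq_zero_of_lt hr0 hr1]
  ring

theorem neg_mod2 (j : Nat) (h : j % 2 = 0) : (-(j : Int) - 1) % 2 = 1 := by omega

theorem neg_mod2' (j : Nat) (h : j % 2 = 1) : (-(j : Int) - 1) % 2 = 0 := by omega

theorem band_two_pow (x : Int) (k : Nat) :
    PySem.Int.band x ((2 : Int) ^ k) = (2 : Int) ^ k * ((x / 2 ^ k) % 2) := by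
  have hcast : ((2 : Int) ^ k) = ((2 ^ k : Nat) : Int) := by push_cast; ring
  by_cases hx : 0 ≤ x
  · obtain ⟨m, rfl⟩ := Int.eq_ofNat_of_zero_le hx
    rw [hcast, PySem.Int.band_natCast, Nat.and_two_pow, Nat.testBit_eq_decide_div_mod_eq]
    have hdiv : ((m : Int) / ((2 ^ k : Nat) : Int)) % 2 = (((m / 2 ^ k) % 2 : Nat) : Int) := by
      rw [Int.natCast_emod, Int.natCast_ediv]
      norm_num
    rw [hdiv]
    rcases Nat.mod_two_eq_zero_or_one (m / 2 ^ k) with h | h <;> simp [h]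
  · push_neg at hx
    have hm1 : (0 : Int) ≤ -x - 1 := by omega
    obtain ⟨m, hm⟩ := Int.eq_ofNat_of_zero_le hm1
    have hxm : x = -(m : Int) - 1 := by omega
    unfold PySem.Int.band
    rw [if_neg (by omega), if_pos (by positivity)]
    have htn : ((2 : Int) ^ k).toNat = 2 ^ k := by
      rw [hcast, Int.toNat_natCast]
    have htm : (-x - 1).toNat = m := by omega
    rw [htn, htm, Nat.and_comm, Nat.and_two_pow, Nat.testBit_eq_decide_div_mod_eq]
    have hdiv : x / (2 : Int) ^ k = -(((m / 2 ^ k : Nat)) : Int) - 1 := by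
      rw [hxm, hcast, neg_succ_ediv m _ (by positivity), ← Int.natCast_ediv]
    rw [hdiv]
    rcases Nat.mod_two_eq_zero_or_one (m / 2 ^ k) with h | h
    · rw [neg_mod2 _ h]
      simp [h]
    · rw [neg_mod2' _ h]
      simp [h]

theorem bit_decomp (a X t u : Int) (ha : 0 < a) (ht : t = 0 ∨ t = 1)
    (h0 : 0 ≤ u) (h1 : u < a) (h : X % (2 * a) = a * t + u) :
    (X / a) % 2 = t ∧ X % a = u := by
  have hXa : X % a = u := by
    have e1 : X % (2 * a) % a = X % a := Int.emod_emod_of_dvd X ⟨2, by ring⟩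
    rw [h] at e1
    rw [add_comm, Int.add_mul_emod_self_left, Int.emod_eq_of_lt h0 h1] at e1
    omega
  refine ⟨?_, hXa⟩
  have hQ : X = (u + a * t) + 2 * (X / (2 * a)) * a := by
    have e := Int.ediv_add_emod X (2 * a)
    rw [h] at e
    linear_combination -e
  have hdiv : X / a = t + 2 * (X / (2 * a)) := by
    conv_lhs => rw [hQ]
    rw [Int.add_mul_ediv_right _ _ ha.ne', Int.add_mul_ediv_left _ _ ha.ne',
        Int.ediv_eq_zero_of_lt h0 h1]
    ring
  rw [hdiv, Int.add_mul_emod_self_left]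
  rcases ht with rfl | rfl <;> norm_num

theorem decomp2 (a x : Int) (ha : 0 < a) :
    x % (2 * a) = a * ((x / a) % 2) + x % a ∧ ((x / a) % 2 = 0 ∨ (x / a) % 2 = 1)
      ∧ 0 ≤ x % a ∧ x % a < a := by
  have h2a : (0 : Int) < 2 * a := by omega
  have hr0 : 0 ≤ x % (2 * a) := Int.emod_nonneg x h2a.ne'
  have hr1 : x % (2 * a) < 2 * a := Int.emod_lt_of_pos x h2a
  have ht : x % (2 * a) / a = 0 ∨ x % (2 * a) / a = 1 := by
    have hlo : 0 ≤ x % (2 * a) / a := Int.ediv_nonneg hr0 ha.le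
    have hhi : x % (2 * a) / a < 2 := by
      rw [Int.ediv_lt_iff_lt_mul ha]
      linarith
    omega
  have hu0 : 0 ≤ x % (2 * a) % a := Int.emod_nonneg _ ha.ne'
  have hu1 : x % (2 * a) % a < a := Int.emod_lt_of_pos _ ha
  have hdec : x % (2 * a) = a * (x % (2 * a) / a) + x % (2 * a) % a := by
    linear_combination -(Int.ediv_add_emod (x % (2 * a)) a)
  obtain ⟨hb, hm⟩ := bit_decomp a x (x % (2 * a) / a) (x % (2 * a) % a) ha ht hu0 hu1 hdec
  rw [← hb] at ht
  rw [← hb, ← hm] at hdec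
  rw [← hm] at hu0 hu1
  exact ⟨hdec, ht, hu0, hu1⟩

theorem mod_flip (a Y v : Int) (ha : 0 < a) (hY : Y % a = v) :
    (a - 1 - Y) % a = a - 1 - v := by
  have hv0 : 0 ≤ v := hY ▸ Int.emod_nonneg Y ha.ne'
  have hv1 : v < a := hY ▸ Int.emod_lt_of_pos Y ha
  have h1 : (a - 1) % a = a - 1 := Int.emod_eq_of_lt (by omega) (by omega)
  rw [Int.sub_emod (a - 1) Y a, hY, h1]
  exact Int.emod_eq_of_lt (by omega) (by omega)

-- the transformed coordinates A carries, expressed from the untouched (x, y), per state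
def actX (st : Int) (m : Int) (x : Int) (y : Int) : Int :=
  match st with
  | 0 => x % m
  | 1 => y % m
  | 2 => m - 1 - y % m
  | 3 => m - 1 - x % m
  | _ => 0

def actY (st : Int) (m : Int) (x : Int) (y : Int) : Int :=
  match st with
  | 0 => y % m
  | 1 => x % m
  | 2 => m - 1 - x % m
  | 3 => m - 1 - y % m
  | _ => 0

theorem horner (k : Nat) : ∀ (st x y d : Int),
    xy2dAltLoop k st x y d = d * 4 ^ k + xy2dAltLoop k st x y 0 := by
  induction k with
  | zero => intro st x y d; simp [xy2dAltLoop]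
  | succ i IH =>
    intro st x y d
    rw [xy2dAltLoop]
    conv_rhs => rw [xy2dAltLoop]
    try dsimp only
    rw [IH _ x y (4 * d + _), IH _ x y (4 * 0 + _)]
    ring

theorem mainInv (k : Nat) : ∀ (st X Y x y : Int),
    (st = 0 ∨ st = 1 ∨ st = 2 ∨ st = 3) →
    X % 2 ^ k = actX st ((2 : Int) ^ k) x y → Y % 2 ^ k = actY st ((2 : Int) ^ k) x y →
    ∀ d : Int, xy2dLoop ((2 : Int) ^ k >>> (1 : Nat)) X Y d = d + xy2dAltLoop k st x y 0 := by
  induction k with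
  | zero =>
    intro st X Y x y hst hX hY d
    have h0 : ((2 : Int) ^ 0) >>> (1 : Nat) = 0 := by decide
    rw [h0, xy2dLoop]
    simp [xy2dAltLoop]
  | succ k IH =>
    intro st X Y x y hst hX hY d
    have ha : (0 : Int) < 2 ^ k := pow2_pos k
    have hsucc : ((2 : Int) ^ (k + 1)) = 2 * 2 ^ k := by ring
    have harg : ((2 : Int) ^ (k + 1)) >>> (1 : Nat) = 2 ^ k := by
      rw [pyShiftRight_one, hsucc, Int.mul_ediv_cancel_left _ (by norm_num)]
    rw [hsucc] at hX hY
    rw [harg, xy2dLoop, dif_pos ha]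
    try dsimp only
    obtain ⟨hx2, hbx, hxl0, hxl1⟩ := decomp2 (2 ^ k) x ha
    obtain ⟨hy2, hby, hyl0, hyl1⟩ := decomp2 (2 ^ k) y ha
    have hBx : PySem.Int.band (x >>> k) 1 = (x / 2 ^ k) % 2 := by
      rw [band_one', pyShiftRight_pow]
    have hBy : PySem.Int.band (y >>> k) 1 = (y / 2 ^ k) % 2 := by
      rw [band_one', pyShiftRight_pow]
    have h44 : (2 : Int) ^ k * 2 ^ k = 4 ^ k := by rw [← mul_pow]; norm_num
    rcases hst with rfl | rfl | rfl | rfl <;> simp only [actX, actY] at hX hY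
    · rcases hbx with hbx | hbx <;> rcases hby with hby | hby
      · -- st=0, bx=0, by=0
        obtain ⟨hXb, hXm⟩ := bit_decomp (2 ^ k) X 0 (x % 2 ^ k) ha (Or.inl rfl) (by linarith [hxl0, hxl1, hyl0, hyl1]) (by linarith [hxl0, hxl1, hyl0, hyl1]) (by rw [hX, hx2, hbx]; try ring)
        obtain ⟨hYb, hYm⟩ := bit_decomp (2 ^ k) Y 0 (y % 2 ^ k) ha (Or.inl rfl) (by linarith [hxl0, hxl1, hyl0, hyl1]) (by linarith [hxl0, hxl1, hyl0, hyl1]) (by rw [hY, hy2, hby]; try ring)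
        have hrx : (if 0 < PySem.Int.band X ((2 : Int) ^ k) then (1 : Int) else 0) = 0 := by rw [band_two_pow, hXb]; simp
        have hry : (if 0 < PySem.Int.band Y ((2 : Int) ^ k) then (1 : Int) else 0) = 0 := by rw [band_two_pow, hYb]; simp
        rw [hrx, hry]
        have hquad : PySem.Int.bxor (3 * (0 : Int)) (0 : Int) = 0 := by decide
        have hrot : rotA ((2 : Int) ^ k) X Y 0 0 = (Y, X) := by norm_num [rotA]
        rw [hquad, hrot]
        try dsimp only
        rw [IH 1 Y X x y (Or.inr (Or.inl rfl)) (by simp only [actX]; linarith [hYm]) (by simp only [actY]; linarith [hXm])]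
        rw [xy2dAltLoop]
        try dsimp only
        rw [hBx, hBy, hbx, hby]
        have htbl : hilbertTbl 0 (2 * 0 + 0) = (0, 1) := by decide
        rw [htbl]
        try dsimp only
        rw [horner k 1 x y (4 * 0 + 0), h44]
        ring
      · -- st=0, bx=0, by=1
        obtain ⟨hXb, hXm⟩ := bit_decomp (2 ^ k) X 0 (x % 2 ^ k) ha (Or.inl rfl) (by linarith [hxl0, hxl1, hyl0, hyl1]) (by linarith [hxl0, hxl1, hyl0, hyl1]) (by rw [hX, hx2, hbx]; try ring)
        obtain ⟨hYb, hYm⟩ := bit_decomp (2 ^ k) Y 1 (y % 2 ^ k) ha (Or.inr rfl) (by linarith [hxl0, hxl1, hyl0, hyl1]) (by linarith [hxl0, hxl1, hyl0, hyl1]) (by rw [hY, hy2, hby]; try ring)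
        have hrx : (if 0 < PySem.Int.band X ((2 : Int) ^ k) then (1 : Int) else 0) = 0 := by rw [band_two_pow, hXb]; simp
        have hry : (if 0 < PySem.Int.band Y ((2 : Int) ^ k) then (1 : Int) else 0) = 1 := by rw [band_two_pow, hYb]; simp [pow2_pos k]
        rw [hrx, hry]
        have hquad : PySem.Int.bxor (3 * (0 : Int)) (1 : Int) = 1 := by decide
        have hrot : rotA ((2 : Int) ^ k) X Y 0 1 = (X, Y) := by norm_num [rotA]
        rw [hquad, hrot]
        try dsimp only
        rw [IH 0 X Y x y (Or.inl rfl) (by simp only [actX]; linarith [hXm]) (by simp only [actY]; linarith [hYm])]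
        rw [xy2dAltLoop]
        try dsimp only
        rw [hBx, hBy, hbx, hby]
        have htbl : hilbertTbl 0 (2 * 0 + 1) = (1, 0) := by decide
        rw [htbl]
        try dsimp only
        rw [horner k 0 x y (4 * 0 + 1), h44]
        ring
      · -- st=0, bx=1, by=0
        obtain ⟨hXb, hXm⟩ := bit_decomp (2 ^ k) X 1 (x % 2 ^ k) ha (Or.inr rfl) (by linarith [hxl0, hxl1, hyl0, hyl1]) (by linarith [hxl0, hxl1, hyl0, hyl1]) (by rw [hX, hx2, hbx]; try ring)
        obtain ⟨hYb, hYm⟩ := bit_decomp (2 ^ k) Y 0 (y % 2 ^ k) ha (Or.inl rfl) (by linarith [hxl0, hxl1, hyl0, hyl1]) (by linarith [hxl0, hxl1, hyl0, hyl1]) (by rw [hY, hy2, hby]; try ring)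
        have hrx : (if 0 < PySem.Int.band X ((2 : Int) ^ k) then (1 : Int) else 0) = 1 := by rw [band_two_pow, hXb]; simp [pow2_pos k]
        have hry : (if 0 < PySem.Int.band Y ((2 : Int) ^ k) then (1 : Int) else 0) = 0 := by rw [band_two_pow, hYb]; simp
        rw [hrx, hry]
        have hquad : PySem.Int.bxor (3 * (1 : Int)) (0 : Int) = 3 := by decide
        have hrot : rotA ((2 : Int) ^ k) X Y 1 0 = ((2 ^ k - 1 - Y), (2 ^ k - 1 - X)) := by norm_num [rotA]
        rw [hquad, hrot]
        try dsimp only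
        rw [IH 2 (2 ^ k - 1 - Y) (2 ^ k - 1 - X) x y (Or.inr (Or.inr (Or.inl rfl))) (by simp only [actX]; rw [mod_flip ((2 : Int) ^ k) Y (y % 2 ^ k) ha hYm]; try ring) (by simp only [actY]; rw [mod_flip ((2 : Int) ^ k) X (x % 2 ^ k) ha hXm]; try ring)]
        rw [xy2dAltLoop]
        try dsimp only
        rw [hBx, hBy, hbx, hby]
        have htbl : hilbertTbl 0 (2 * 1 + 0) = (3, 2) := by decide
        rw [htbl]
        try dsimp only
        rw [horner k 2 x y (4 * 0 + 3), h44]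
        ring
      · -- st=0, bx=1, by=1
        obtain ⟨hXb, hXm⟩ := bit_decomp (2 ^ k) X 1 (x % 2 ^ k) ha (Or.inr rfl) (by linarith [hxl0, hxl1, hyl0, hyl1]) (by linarith [hxl0, hxl1, hyl0, hyl1]) (by rw [hX, hx2, hbx]; try ring)
        obtain ⟨hYb, hYm⟩ := bit_decomp (2 ^ k) Y 1 (y % 2 ^ k) ha (Or.inr rfl) (by linarith [hxl0, hxl1, hyl0, hyl1]) (by linarith [hxl0, hxl1, hyl0, hyl1]) (by rw [hY, hy2, hby]; try ring)
        have hrx : (if 0 < PySem.Int.band X ((2 : Int) ^ k) then (1 : Int) else 0) = 1 := by rw [band_two_pow, hXb]; simp [pow2_pos k]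
        have hry : (if 0 < PySem.Int.band Y ((2 : Int) ^ k) then (1 : Int) else 0) = 1 := by rw [band_two_pow, hYb]; simp [pow2_pos k]
        rw [hrx, hry]
        have hquad : PySem.Int.bxor (3 * (1 : Int)) (1 : Int) = 2 := by decide
        have hrot : rotA ((2 : Int) ^ k) X Y 1 1 = (X, Y) := by norm_num [rotA]
        rw [hquad, hrot]
        try dsimp only
        rw [IH 0 X Y x y (Or.inl rfl) (by simp only [actX]; linarith [hXm]) (by simp only [actY]; linarith [hYm])]
        rw [xy2dAltLoop]
        try dsimp only
        rw [hBx, hBy, hbx, hby]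
        have htbl : hilbertTbl 0 (2 * 1 + 1) = (2, 0) := by decide
        rw [htbl]
        try dsimp only
        rw [horner k 0 x y (4 * 0 + 2), h44]
        ring
    · rcases hbx with hbx | hbx <;> rcases hby with hby | hby
      · -- st=1, bx=0, by=0
        obtain ⟨hXb, hXm⟩ := bit_decomp (2 ^ k) X 0 (y % 2 ^ k) ha (Or.inl rfl) (by linarith [hxl0, hxl1, hyl0, hyl1]) (by linarith [hxl0, hxl1, hyl0, hyl1]) (by rw [hX, hy2, hby]; try ring)
        obtain ⟨hYb, hYm⟩ := bit_decomp (2 ^ k) Y 0 (x % 2 ^ k) ha (Or.inl rfl) (by linarith [hxl0, hxl1, hyl0, hyl1]) (by linarith [hxl0, hxl1, hyl0, hyl1]) (by rw [hY, hx2, hbx]; try ring)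
        have hrx : (if 0 < PySem.Int.band X ((2 : Int) ^ k) then (1 : Int) else 0) = 0 := by rw [band_two_pow, hXb]; simp
        have hry : (if 0 < PySem.Int.band Y ((2 : Int) ^ k) then (1 : Int) else 0) = 0 := by rw [band_two_pow, hYb]; simp
        rw [hrx, hry]
        have hquad : PySem.Int.bxor (3 * (0 : Int)) (0 : Int) = 0 := by decide
        have hrot : rotA ((2 : Int) ^ k) X Y 0 0 = (Y, X) := by norm_num [rotA]
        rw [hquad, hrot]
        try dsimp only
        rw [IH 0 Y X x y (Or.inl rfl) (by simp only [actX]; linarith [hYm]) (by simp only [actY]; linarith [hXm])]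
        rw [xy2dAltLoop]
        try dsimp only
        rw [hBx, hBy, hbx, hby]
        have htbl : hilbertTbl 1 (2 * 0 + 0) = (0, 0) := by decide
        rw [htbl]
        try dsimp only
        rw [horner k 0 x y (4 * 0 + 0), h44]
        ring
      · -- st=1, bx=0, by=1
        obtain ⟨hXb, hXm⟩ := bit_decomp (2 ^ k) X 1 (y % 2 ^ k) ha (Or.inr rfl) (by linarith [hxl0, hxl1, hyl0, hyl1]) (by linarith [hxl0, hxl1, hyl0, hyl1]) (by rw [hX, hy2, hby]; try ring)
        obtain ⟨hYb, hYm⟩ := bit_decomp (2 ^ k) Y 0 (x % 2 ^ k) ha (Or.inl rfl) (by linarith [hxl0, hxl1, hyl0, hyl1]) (by linarith [hxl0, hxl1, hyl0, hyl1]) (by rw [hY, hx2, hbx]; try ring)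
        have hrx : (if 0 < PySem.Int.band X ((2 : Int) ^ k) then (1 : Int) else 0) = 1 := by rw [band_two_pow, hXb]; simp [pow2_pos k]
        have hry : (if 0 < PySem.Int.band Y ((2 : Int) ^ k) then (1 : Int) else 0) = 0 := by rw [band_two_pow, hYb]; simp
        rw [hrx, hry]
        have hquad : PySem.Int.bxor (3 * (1 : Int)) (0 : Int) = 3 := by decide
        have hrot : rotA ((2 : Int) ^ k) X Y 1 0 = ((2 ^ k - 1 - Y), (2 ^ k - 1 - X)) := by norm_num [rotA]
        rw [hquad, hrot]
        try dsimp only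
        rw [IH 3 (2 ^ k - 1 - Y) (2 ^ k - 1 - X) x y (Or.inr (Or.inr (Or.inr rfl))) (by simp only [actX]; rw [mod_flip ((2 : Int) ^ k) Y (x % 2 ^ k) ha hYm]; try ring) (by simp only [actY]; rw [mod_flip ((2 : Int) ^ k) X (y % 2 ^ k) ha hXm]; try ring)]
        rw [xy2dAltLoop]
        try dsimp only
        rw [hBx, hBy, hbx, hby]
        have htbl : hilbertTbl 1 (2 * 0 + 1) = (3, 3) := by decide
        rw [htbl]
        try dsimp only
        rw [horner k 3 x y (4 * 0 + 3), h44]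
        ring
      · -- st=1, bx=1, by=0
        obtain ⟨hXb, hXm⟩ := bit_decomp (2 ^ k) X 0 (y % 2 ^ k) ha (Or.inl rfl) (by linarith [hxl0, hxl1, hyl0, hyl1]) (by linarith [hxl0, hxl1, hyl0, hyl1]) (by rw [hX, hy2, hby]; try ring)
        obtain ⟨hYb, hYm⟩ := bit_decomp (2 ^ k) Y 1 (x % 2 ^ k) ha (Or.inr rfl) (by linarith [hxl0, hxl1, hyl0, hyl1]) (by linarith [hxl0, hxl1, hyl0, hyl1]) (by rw [hY, hx2, hbx]; try ring)
        have hrx : (if 0 < PySem.Int.band X ((2 : Int) ^ k) then (1 : Int) else 0) = 0 := by rw [band_two_pow, hXb]; simp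
        have hry : (if 0 < PySem.Int.band Y ((2 : Int) ^ k) then (1 : Int) else 0) = 1 := by rw [band_two_pow, hYb]; simp [pow2_pos k]
        rw [hrx, hry]
        have hquad : PySem.Int.bxor (3 * (0 : Int)) (1 : Int) = 1 := by decide
        have hrot : rotA ((2 : Int) ^ k) X Y 0 1 = (X, Y) := by norm_num [rotA]
        rw [hquad, hrot]
        try dsimp only
        rw [IH 1 X Y x y (Or.inr (Or.inl rfl)) (by simp only [actX]; linarith [hXm]) (by simp only [actY]; linarith [hYm])]
        rw [xy2dAltLoop]
        try dsimp only
        rw [hBx, hBy, hbx, hby]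
        have htbl : hilbertTbl 1 (2 * 1 + 0) = (1, 1) := by decide
        rw [htbl]
        try dsimp only
        rw [horner k 1 x y (4 * 0 + 1), h44]
        ring
      · -- st=1, bx=1, by=1
        obtain ⟨hXb, hXm⟩ := bit_decomp (2 ^ k) X 1 (y % 2 ^ k) ha (Or.inr rfl) (by linarith [hxl0, hxl1, hyl0, hyl1]) (by linarith [hxl0, hxl1, hyl0, hyl1]) (by rw [hX, hy2, hby]; try ring)
        obtain ⟨hYb, hYm⟩ := bit_decomp (2 ^ k) Y 1 (x % 2 ^ k) ha (Or.inr rfl) (by linarith [hxl0, hxl1, hyl0, hyl1]) (by linarith [hxl0, hxl1, hyl0, hyl1]) (by rw [hY, hx2, hbx]; try ring)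
        have hrx : (if 0 < PySem.Int.band X ((2 : Int) ^ k) then (1 : Int) else 0) = 1 := by rw [band_two_pow, hXb]; simp [pow2_pos k]
        have hry : (if 0 < PySem.Int.band Y ((2 : Int) ^ k) then (1 : Int) else 0) = 1 := by rw [band_two_pow, hYb]; simp [pow2_pos k]
        rw [hrx, hry]
        have hquad : PySem.Int.bxor (3 * (1 : Int)) (1 : Int) = 2 := by decide
        have hrot : rotA ((2 : Int) ^ k) X Y 1 1 = (X, Y) := by norm_num [rotA]
        rw [hquad, hrot]
        try dsimp only
        rw [IH 1 X Y x y (Or.inr (Or.inl rfl)) (by simp only [actX]; linarith [hXm]) (by simp only [actY]; linarith [hYm])]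
        rw [xy2dAltLoop]
        try dsimp only
        rw [hBx, hBy, hbx, hby]
        have htbl : hilbertTbl 1 (2 * 1 + 1) = (2, 1) := by decide
        rw [htbl]
        try dsimp only
        rw [horner k 1 x y (4 * 0 + 2), h44]
        ring
    · rcases hbx with hbx | hbx <;> rcases hby with hby | hby
      · -- st=2, bx=0, by=0
        obtain ⟨hXb, hXm⟩ := bit_decomp (2 ^ k) X 1 (2 ^ k - 1 - y % 2 ^ k) ha (Or.inr rfl) (by linarith [hxl0, hxl1, hyl0, hyl1]) (by linarith [hxl0, hxl1, hyl0, hyl1]) (by rw [hX, hy2, hby]; try ring)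
        obtain ⟨hYb, hYm⟩ := bit_decomp (2 ^ k) Y 1 (2 ^ k - 1 - x % 2 ^ k) ha (Or.inr rfl) (by linarith [hxl0, hxl1, hyl0, hyl1]) (by linarith [hxl0, hxl1, hyl0, hyl1]) (by rw [hY, hx2, hbx]; try ring)
        have hrx : (if 0 < PySem.Int.band X ((2 : Int) ^ k) then (1 : Int) else 0) = 1 := by rw [band_two_pow, hXb]; simp [pow2_pos k]
        have hry : (if 0 < PySem.Int.band Y ((2 : Int) ^ k) then (1 : Int) else 0) = 1 := by rw [band_two_pow, hYb]; simp [pow2_pos k]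
        rw [hrx, hry]
        have hquad : PySem.Int.bxor (3 * (1 : Int)) (1 : Int) = 2 := by decide
        have hrot : rotA ((2 : Int) ^ k) X Y 1 1 = (X, Y) := by norm_num [rotA]
        rw [hquad, hrot]
        try dsimp only
        rw [IH 2 X Y x y (Or.inr (Or.inr (Or.inl rfl))) (by simp only [actX]; linarith [hXm]) (by simp only [actY]; linarith [hYm])]
        rw [xy2dAltLoop]
        try dsimp only
        rw [hBx, hBy, hbx, hby]
        have htbl : hilbertTbl 2 (2 * 0 + 0) = (2, 2) := by decide
        rw [htbl]
        try dsimp only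
        rw [horner k 2 x y (4 * 0 + 2), h44]
        ring
      · -- st=2, bx=0, by=1
        obtain ⟨hXb, hXm⟩ := bit_decomp (2 ^ k) X 0 (2 ^ k - 1 - y % 2 ^ k) ha (Or.inl rfl) (by linarith [hxl0, hxl1, hyl0, hyl1]) (by linarith [hxl0, hxl1, hyl0, hyl1]) (by rw [hX, hy2, hby]; try ring)
        obtain ⟨hYb, hYm⟩ := bit_decomp (2 ^ k) Y 1 (2 ^ k - 1 - x % 2 ^ k) ha (Or.inr rfl) (by linarith [hxl0, hxl1, hyl0, hyl1]) (by linarith [hxl0, hxl1, hyl0, hyl1]) (by rw [hY, hx2, hbx]; try ring)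
        have hrx : (if 0 < PySem.Int.band X ((2 : Int) ^ k) then (1 : Int) else 0) = 0 := by rw [band_two_pow, hXb]; simp
        have hry : (if 0 < PySem.Int.band Y ((2 : Int) ^ k) then (1 : Int) else 0) = 1 := by rw [band_two_pow, hYb]; simp [pow2_pos k]
        rw [hrx, hry]
        have hquad : PySem.Int.bxor (3 * (0 : Int)) (1 : Int) = 1 := by decide
        have hrot : rotA ((2 : Int) ^ k) X Y 0 1 = (X, Y) := by norm_num [rotA]
        rw [hquad, hrot]
        try dsimp only
        rw [IH 2 X Y x y (Or.inr (Or.inr (Or.inl rfl))) (by simp only [actX]; linarith [hXm]) (by simp only [actY]; linarith [hYm])]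
        rw [xy2dAltLoop]
        try dsimp only
        rw [hBx, hBy, hbx, hby]
        have htbl : hilbertTbl 2 (2 * 0 + 1) = (1, 2) := by decide
        rw [htbl]
        try dsimp only
        rw [horner k 2 x y (4 * 0 + 1), h44]
        ring
      · -- st=2, bx=1, by=0
        obtain ⟨hXb, hXm⟩ := bit_decomp (2 ^ k) X 1 (2 ^ k - 1 - y % 2 ^ k) ha (Or.inr rfl) (by linarith [hxl0, hxl1, hyl0, hyl1]) (by linarith [hxl0, hxl1, hyl0, hyl1]) (by rw [hX, hy2, hby]; try ring)
        obtain ⟨hYb, hYm⟩ := bit_decomp (2 ^ k) Y 0 (2 ^ k - 1 - x % 2 ^ k) ha (Or.inl rfl) (by linarith [hxl0, hxl1, hyl0, hyl1]) (by linarith [hxl0, hxl1, hyl0, hyl1]) (by rw [hY, hx2, hbx]; try ring)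
        have hrx : (if 0 < PySem.Int.band X ((2 : Int) ^ k) then (1 : Int) else 0) = 1 := by rw [band_two_pow, hXb]; simp [pow2_pos k]
        have hry : (if 0 < PySem.Int.band Y ((2 : Int) ^ k) then (1 : Int) else 0) = 0 := by rw [band_two_pow, hYb]; simp
        rw [hrx, hry]
        have hquad : PySem.Int.bxor (3 * (1 : Int)) (0 : Int) = 3 := by decide
        have hrot : rotA ((2 : Int) ^ k) X Y 1 0 = ((2 ^ k - 1 - Y), (2 ^ k - 1 - X)) := by norm_num [rotA]
        rw [hquad, hrot]
        try dsimp only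
        rw [IH 0 (2 ^ k - 1 - Y) (2 ^ k - 1 - X) x y (Or.inl rfl) (by simp only [actX]; rw [mod_flip ((2 : Int) ^ k) Y (2 ^ k - 1 - x % 2 ^ k) ha hYm]; try ring) (by simp only [actY]; rw [mod_flip ((2 : Int) ^ k) X (2 ^ k - 1 - y % 2 ^ k) ha hXm]; try ring)]
        rw [xy2dAltLoop]
        try dsimp only
        rw [hBx, hBy, hbx, hby]
        have htbl : hilbertTbl 2 (2 * 1 + 0) = (3, 0) := by decide
        rw [htbl]
        try dsimp only
        rw [horner k 0 x y (4 * 0 + 3), h44]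
        ring
      · -- st=2, bx=1, by=1
        obtain ⟨hXb, hXm⟩ := bit_decomp (2 ^ k) X 0 (2 ^ k - 1 - y % 2 ^ k) ha (Or.inl rfl) (by linarith [hxl0, hxl1, hyl0, hyl1]) (by linarith [hxl0, hxl1, hyl0, hyl1]) (by rw [hX, hy2, hby]; try ring)
        obtain ⟨hYb, hYm⟩ := bit_decomp (2 ^ k) Y 0 (2 ^ k - 1 - x % 2 ^ k) ha (Or.inl rfl) (by linarith [hxl0, hxl1, hyl0, hyl1]) (by linarith [hxl0, hxl1, hyl0, hyl1]) (by rw [hY, hx2, hbx]; try ring)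
        have hrx : (if 0 < PySem.Int.band X ((2 : Int) ^ k) then (1 : Int) else 0) = 0 := by rw [band_two_pow, hXb]; simp
        have hry : (if 0 < PySem.Int.band Y ((2 : Int) ^ k) then (1 : Int) else 0) = 0 := by rw [band_two_pow, hYb]; simp
        rw [hrx, hry]
        have hquad : PySem.Int.bxor (3 * (0 : Int)) (0 : Int) = 0 := by decide
        have hrot : rotA ((2 : Int) ^ k) X Y 0 0 = (Y, X) := by norm_num [rotA]
        rw [hquad, hrot]
        try dsimp only
        rw [IH 3 Y X x y (Or.inr (Or.inr (Or.inr rfl))) (by simp only [actX]; linarith [hYm]) (by simp only [actY]; linarith [hXm])]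
        rw [xy2dAltLoop]
        try dsimp only
        rw [hBx, hBy, hbx, hby]
        have htbl : hilbertTbl 2 (2 * 1 + 1) = (0, 3) := by decide
        rw [htbl]
        try dsimp only
        rw [horner k 3 x y (4 * 0 + 0), h44]
        ring
    · rcases hbx with hbx | hbx <;> rcases hby with hby | hby
      · -- st=3, bx=0, by=0
        obtain ⟨hXb, hXm⟩ := bit_decomp (2 ^ k) X 1 (2 ^ k - 1 - x % 2 ^ k) ha (Or.inr rfl) (by linarith [hxl0, hxl1, hyl0, hyl1]) (by linarith [hxl0, hxl1, hyl0, hyl1]) (by rw [hX, hx2, hbx]; try ring)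
        obtain ⟨hYb, hYm⟩ := bit_decomp (2 ^ k) Y 1 (2 ^ k - 1 - y % 2 ^ k) ha (Or.inr rfl) (by linarith [hxl0, hxl1, hyl0, hyl1]) (by linarith [hxl0, hxl1, hyl0, hyl1]) (by rw [hY, hy2, hby]; try ring)
        have hrx : (if 0 < PySem.Int.band X ((2 : Int) ^ k) then (1 : Int) else 0) = 1 := by rw [band_two_pow, hXb]; simp [pow2_pos k]
        have hry : (if 0 < PySem.Int.band Y ((2 : Int) ^ k) then (1 : Int) else 0) = 1 := by rw [band_two_pow, hYb]; simp [pow2_pos k]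
        rw [hrx, hry]
        have hquad : PySem.Int.bxor (3 * (1 : Int)) (1 : Int) = 2 := by decide
        have hrot : rotA ((2 : Int) ^ k) X Y 1 1 = (X, Y) := by norm_num [rotA]
        rw [hquad, hrot]
        try dsimp only
        rw [IH 3 X Y x y (Or.inr (Or.inr (Or.inr rfl))) (by simp only [actX]; linarith [hXm]) (by simp only [actY]; linarith [hYm])]
        rw [xy2dAltLoop]
        try dsimp only
        rw [hBx, hBy, hbx, hby]
        have htbl : hilbertTbl 3 (2 * 0 + 0) = (2, 3) := by decide
        rw [htbl]
        try dsimp only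
        rw [horner k 3 x y (4 * 0 + 2), h44]
        ring
      · -- st=3, bx=0, by=1
        obtain ⟨hXb, hXm⟩ := bit_decomp (2 ^ k) X 1 (2 ^ k - 1 - x % 2 ^ k) ha (Or.inr rfl) (by linarith [hxl0, hxl1, hyl0, hyl1]) (by linarith [hxl0, hxl1, hyl0, hyl1]) (by rw [hX, hx2, hbx]; try ring)
        obtain ⟨hYb, hYm⟩ := bit_decomp (2 ^ k) Y 0 (2 ^ k - 1 - y % 2 ^ k) ha (Or.inl rfl) (by linarith [hxl0, hxl1, hyl0, hyl1]) (by linarith [hxl0, hxl1, hyl0, hyl1]) (by rw [hY, hy2, hby]; try ring)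
        have hrx : (if 0 < PySem.Int.band X ((2 : Int) ^ k) then (1 : Int) else 0) = 1 := by rw [band_two_pow, hXb]; simp [pow2_pos k]
        have hry : (if 0 < PySem.Int.band Y ((2 : Int) ^ k) then (1 : Int) else 0) = 0 := by rw [band_two_pow, hYb]; simp
        rw [hrx, hry]
        have hquad : PySem.Int.bxor (3 * (1 : Int)) (0 : Int) = 3 := by decide
        have hrot : rotA ((2 : Int) ^ k) X Y 1 0 = ((2 ^ k - 1 - Y), (2 ^ k - 1 - X)) := by norm_num [rotA]
        rw [hquad, hrot]
        try dsimp only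
        rw [IH 1 (2 ^ k - 1 - Y) (2 ^ k - 1 - X) x y (Or.inr (Or.inl rfl)) (by simp only [actX]; rw [mod_flip ((2 : Int) ^ k) Y (2 ^ k - 1 - y % 2 ^ k) ha hYm]; try ring) (by simp only [actY]; rw [mod_flip ((2 : Int) ^ k) X (2 ^ k - 1 - x % 2 ^ k) ha hXm]; try ring)]
        rw [xy2dAltLoop]
        try dsimp only
        rw [hBx, hBy, hbx, hby]
        have htbl : hilbertTbl 3 (2 * 0 + 1) = (3, 1) := by decide
        rw [htbl]
        try dsimp only
        rw [horner k 1 x y (4 * 0 + 3), h44]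
        ring
      · -- st=3, bx=1, by=0
        obtain ⟨hXb, hXm⟩ := bit_decomp (2 ^ k) X 0 (2 ^ k - 1 - x % 2 ^ k) ha (Or.inl rfl) (by linarith [hxl0, hxl1, hyl0, hyl1]) (by linarith [hxl0, hxl1, hyl0, hyl1]) (by rw [hX, hx2, hbx]; try ring)
        obtain ⟨hYb, hYm⟩ := bit_decomp (2 ^ k) Y 1 (2 ^ k - 1 - y % 2 ^ k) ha (Or.inr rfl) (by linarith [hxl0, hxl1, hyl0, hyl1]) (by linarith [hxl0, hxl1, hyl0, hyl1]) (by rw [hY, hy2, hby]; try ring)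
        have hrx : (if 0 < PySem.Int.band X ((2 : Int) ^ k) then (1 : Int) else 0) = 0 := by rw [band_two_pow, hXb]; simp
        have hry : (if 0 < PySem.Int.band Y ((2 : Int) ^ k) then (1 : Int) else 0) = 1 := by rw [band_two_pow, hYb]; simp [pow2_pos k]
        rw [hrx, hry]
        have hquad : PySem.Int.bxor (3 * (0 : Int)) (1 : Int) = 1 := by decide
        have hrot : rotA ((2 : Int) ^ k) X Y 0 1 = (X, Y) := by norm_num [rotA]
        rw [hquad, hrot]
        try dsimp only
        rw [IH 3 X Y x y (Or.inr (Or.inr (Or.inr rfl))) (by simp only [actX]; linarith [hXm]) (by simp only [actY]; linarith [hYm])]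
        rw [xy2dAltLoop]
        try dsimp only
        rw [hBx, hBy, hbx, hby]
        have htbl : hilbertTbl 3 (2 * 1 + 0) = (1, 3) := by decide
        rw [htbl]
        try dsimp only
        rw [horner k 3 x y (4 * 0 + 1), h44]
        ring
      · -- st=3, bx=1, by=1
        obtain ⟨hXb, hXm⟩ := bit_decomp (2 ^ k) X 0 (2 ^ k - 1 - x % 2 ^ k) ha (Or.inl rfl) (by linarith [hxl0, hxl1, hyl0, hyl1]) (by linarith [hxl0, hxl1, hyl0, hyl1]) (by rw [hX, hx2, hbx]; try ring)
        obtain ⟨hYb, hYm⟩ := bit_decomp (2 ^ k) Y 0 (2 ^ k - 1 - y % 2 ^ k) ha (Or.inl rfl) (by linarith [hxl0, hxl1, hyl0, hyl1]) (by linarith [hxl0, hxl1, hyl0, hyl1]) (by rw [hY, hy2, hby]; try ring)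
        have hrx : (if 0 < PySem.Int.band X ((2 : Int) ^ k) then (1 : Int) else 0) = 0 := by rw [band_two_pow, hXb]; simp
        have hry : (if 0 < PySem.Int.band Y ((2 : Int) ^ k) then (1 : Int) else 0) = 0 := by rw [band_two_pow, hYb]; simp
        rw [hrx, hry]
        have hquad : PySem.Int.bxor (3 * (0 : Int)) (0 : Int) = 0 := by decide
        have hrot : rotA ((2 : Int) ^ k) X Y 0 0 = (Y, X) := by norm_num [rotA]
        rw [hquad, hrot]
        try dsimp only
        rw [IH 2 Y X x y (Or.inr (Or.inr (Or.inl rfl))) (by simp only [actX]; linarith [hYm]) (by simp only [actY]; linarith [hXm])]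
        rw [xy2dAltLoop]
        try dsimp only
        rw [hBx, hBy, hbx, hby]
        have htbl : hilbertTbl 3 (2 * 1 + 1) = (0, 2) := by decide
        rw [htbl]
        try dsimp only
        rw [horner k 2 x y (4 * 0 + 0), h44]
        ring

-- ===== VERDICT (by name: the statement is the Claim_ definition above) =====
theorem xy2d_spec : Claim_equal_xy2d := by
  unfold Claim_equal_xy2d
  intro p x y _ hp
  unfold Spec_xy2d xy2d xy2d_alt
  try dsimp only
  have h1 : ((1 : Int) <<< p.toNat : Int) = 2 ^ p.toNat := by rw [Int.shiftLeft_eq]; ring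
  rw [h1, pyMod_pow2, pyMod_pow2]
  have hmain := mainInv p.toNat 0 x y (x % 2 ^ p.toNat) (y % 2 ^ p.toNat) (Or.inl rfl)
    (by simp only [actX]; rw [Int.emod_emod_of_dvd _ dvd_rfl])
    (by simp only [actY]; rw [Int.emod_emod_of_dvd _ dvd_rfl]) 0
  rw [hmain, zero_add]
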